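-- pv_equiv track=rewrite | github.com/avbakanin/ezoteric_bot | app/features/admin/router.py | _extract_action_and_target
-- ===== SOURCE A (Python) =====
-- from typing import List, Tuple
--
-- _ALLOWED_ACTIONS = {"on", "off", "toggle", "status"}
--
-- def _extract_action_and_target(args: List[str], default_user_id: int) -> Tuple[str, int]:
--     action = None
--     target_id = None
--
--     for token in args:
--         clean = token.strip()
--         if not clean:
--             continue
--
--         if clean.startswith("@"):
--             continue
--
--         normalized = clean.lower().strip(",.")
--
--         if normalized in _ALLOWED_ACTIONS and action is None:
--             action = normalized
--             continue
--
--         numeric_candidate = clean.strip(",.")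
--         if numeric_candidate.lstrip("+").isdigit() and target_id is None:
--             try:
--                 target_id = int(numeric_candidate)
--             except ValueError:
--                 continue
--
--     if action is None:
--         action = "toggle"
--     if target_id is None:
--         target_id = default_user_id
--
--     return action, target_id
-- ===== SOURCE B (Python) =====
-- from typing import List, Tuple
--
-- _ALLOWED_ACTIONS = {"on", "off", "toggle", "status"}
--
-- def _as_int(c):
--     if not c.lstrip("+").isdigit():
--         return None
--     try:
--         return int(c)  # can still fail (e.g. more than one leading '+')
--     except ValueError:
--         return None
--
-- def _extract_action_and_target(args: List[str], default_user_id: int) -> Tuple[str, int]: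
--     cleans = [c for c in (t.strip() for t in args) if c and not c.startswith("@")]
--     action = next((n for n in (c.lower().strip(",.") for c in cleans)
--                    if n in _ALLOWED_ACTIONS), "toggle")
--     target_id = next((v for v in (_as_int(c.strip(",.")) for c in cleans)
--                       if v is not None), default_user_id)
--     return action, target_id
-- ===== Notes on version B (the rewrite author's own statement) =====
-- stated objective: simpler
-- what changed: Replaces the single fused loop threading two None-sentinel accumulators with a pre-filtering of cleaned tokens followed by two independent first-match searches (one for the action word, one for the numeric target).
import Mathlib
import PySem

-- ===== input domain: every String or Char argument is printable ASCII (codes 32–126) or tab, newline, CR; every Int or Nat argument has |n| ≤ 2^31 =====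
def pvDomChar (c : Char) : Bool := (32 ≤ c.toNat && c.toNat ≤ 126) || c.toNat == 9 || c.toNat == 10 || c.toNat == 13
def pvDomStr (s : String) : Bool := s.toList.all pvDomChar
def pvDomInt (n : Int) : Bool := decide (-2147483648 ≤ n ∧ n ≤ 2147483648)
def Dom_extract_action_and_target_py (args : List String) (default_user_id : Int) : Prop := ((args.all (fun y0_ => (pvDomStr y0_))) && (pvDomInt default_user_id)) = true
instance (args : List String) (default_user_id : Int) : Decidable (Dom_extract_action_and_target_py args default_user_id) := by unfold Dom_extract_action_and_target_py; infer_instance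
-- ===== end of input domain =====

-- B replaces A's single fused loop with two None-sentinel accumulators by two independent
-- first-match searches over the pre-filtered cleaned tokens (objective: simpler decomposition).


-- shared helpers: s.lstrip("+") (drops every leading '+'; exact) and the module
-- constant _ALLOWED_ACTIONS (a set of distinct strings, used only for membership tests)
def pyLstripPlus (s : String) : String := String.ofList (s.toList.dropWhile (· == '+'))
def pyAllowedActions : List String := ["on", "off", "toggle", "status"]

-- ===== PORT A =====
-- the fused `for token in args` loop over the two accumulators (action, target_id)
def aLoop : List String → Option String → Option Int → Option String × Option Int
  | [], action, target => (action, target)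
  | token :: rest, action, target =>
      let clean := PySem.Str.strip token
      if clean == "" then aLoop rest action target
      else if PySem.Str.startswith clean "@" then aLoop rest action target
      else
        let normalized := PySem.Str.stripChars (PySem.Str.lower clean) ",."
        if pyAllowedActions.contains normalized && action.isNone then
          aLoop rest (some normalized) target
        else
          let numeric := PySem.Str.stripChars clean ",."
          if PySem.Str.strIsdigit (pyLstripPlus numeric) && target.isNone then
            match PySem.Int.ofStr? numeric with
            | some v => aLoop rest action (some v)
            | none => aLoop rest action target
          else
            aLoop rest action target

def extract_action_and_target_py (args : List String) (default_user_id : Int) : String × Int :=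
  let r := aLoop args none none
  (r.1.getD "toggle", r.2.getD default_user_id)

-- ===== PORT B =====
-- Source B's _as_int: gate c.lstrip('+').isdigit(), then int(c) (None on ValueError = none)
def altAsInt (c : String) : Option Int :=
  if PySem.Str.strIsdigit (pyLstripPlus c) then PySem.Int.ofStr? c else none

def altValid (c : String) : Bool := !(c == "") && !(PySem.Str.startswith c "@")
def altActionOf (c : String) : Option String :=
  let n := PySem.Str.stripChars (PySem.Str.lower c) ",."
  if pyAllowedActions.contains n then some n else none

def extract_action_and_target_py_alt (args : List String) (default_user_id : Int) : String × Int :=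
  let cleans := (args.map PySem.Str.strip).filter altValid
  let action := (cleans.findSome? altActionOf).getD "toggle"
  let target := (cleans.findSome? (fun c => altAsInt (PySem.Str.stripChars c ",."))).getD default_user_id
  (action, target)

-- ===== PRECONDITION & SPEC =====
def Spec_extract_action_and_target_py (args : List String) (default_user_id : Int) (out : String × Int) : Prop := out = extract_action_and_target_py_alt args default_user_id
instance (args : List String) (default_user_id : Int) (out : String × Int) : Decidable (Spec_extract_action_and_target_py args default_user_id out) := by unfold Spec_extract_action_and_target_py; infer_instance

-- ===== CLAIM (what is proved, stated in full; the proofs are below) =====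
def Claim_equal_extract_action_and_target_py : Prop := ∀ (args : List String) (default_user_id : Int), Dom_extract_action_and_target_py args default_user_id → Spec_extract_action_and_target_py args default_user_id (extract_action_and_target_py args default_user_id)

-- ===== LEMMAS AND PROOFS =====

lemma lowerChar_cases (a : Char) : PySem.Chars.lowerChar a = a ∨
    ((PySem.Chars.lowerChar a).toNat = a.toNat + 32 ∧ 65 ≤ a.toNat ∧ a.toNat ≤ 90) := by
  unfold PySem.Chars.lowerChar PySem.Chars.isupper
  by_cases h : (decide ('A' ≤ a) && decide (a ≤ 'Z')) = true
  · right
    rw [if_pos h]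
    simp only [Bool.and_eq_true, decide_eq_true_eq, Char.le_def, UInt32.le_iff_toNat_le] at h
    have h65 : 65 ≤ a.toNat := h.1
    have h90 : a.toNat ≤ 90 := h.2
    have hval : (a.toNat + 32).isValidChar := Or.inl (by omega)
    rw [Char.toNat_ofNat, if_pos hval]
    exact ⟨rfl, h65, h90⟩
  · left; rw [if_neg h]
lemma char_ne_of_toNat_ne {a b : Char} (h : a.toNat ≠ b.toNat) : (a == b) = false := by
  by_contra hc
  simp only [Bool.not_eq_false, beq_iff_eq] at hc
  exact h (by rw [hc])

lemma head_not_plus_digit (x l : Char) (h : PySem.Chars.lowerChar x = l) (h97 : 97 ≤ l.toNat) :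
    (x == '+') = false ∧ PySem.Chars.isdigit x = false := by
  have hx : 65 ≤ x.toNat := by
    rcases lowerChar_cases x with hc | ⟨hc, h1, h2⟩
    · rw [hc] at h; subst h; omega
    · rw [h] at hc; omega
  refine ⟨char_ne_of_toNat_ne (by change x.toNat ≠ 43; omega), ?_⟩
  unfold PySem.Chars.isdigit
  have h9 : ¬ (x ≤ '9') := by
    simp only [Char.le_def, UInt32.le_iff_toNat_le]
    change ¬ (x.toNat ≤ 57); omega
  simp [h9]

lemma mem_punct_lowerChar (x : Char) :
    ([',', '.'].contains (PySem.Chars.lowerChar x)) = ([',', '.'].contains x) := by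
  rcases lowerChar_cases x with hc | ⟨hc, h1, h2⟩
  · rw [hc]
  · have hl : (PySem.Chars.lowerChar x == ',') = false :=
      char_ne_of_toNat_ne (by rw [hc]; change _ ≠ 44; omega)
    have hl' : (PySem.Chars.lowerChar x == '.') = false :=
      char_ne_of_toNat_ne (by rw [hc]; change _ ≠ 46; omega)
    have hx : (x == ',') = false := char_ne_of_toNat_ne (by change x.toNat ≠ 44; omega)
    have hx' : (x == '.') = false := char_ne_of_toNat_ne (by change x.toNat ≠ 46; omega)
    simp only [List.contains_cons, List.contains_nil, hl, hl', hx, hx']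

lemma stripChars_lower_comm (s : List Char) :
    PySem.Chars.stripChars (PySem.Chars.lower s) [',', '.'] =
      PySem.Chars.lower (PySem.Chars.stripChars s [',', '.']) := by
  unfold PySem.Chars.stripChars PySem.Chars.lower
  have hp : ((fun c => [',', '.'].contains c) ∘ PySem.Chars.lowerChar) =
      (fun c => [',', '.'].contains c) := funext fun x => mem_punct_lowerChar x
  simp only [← List.map_reverse, List.dropWhile_map, hp]

lemma excl (c : String)
    (h : pyAllowedActions.contains (PySem.Str.stripChars (PySem.Str.lower c) ",.") = true) :
    altAsInt (PySem.Str.stripChars c ",.") = none := by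
  unfold altAsInt
  suffices hs : PySem.Str.strIsdigit (pyLstripPlus (PySem.Str.stripChars c ",.")) = false by
    rw [if_neg (by rw [hs]; exact Bool.false_ne_true)]
  have hpunct : (",.").toList = [',', '.'] := by decide
  unfold PySem.Str.stripChars PySem.Str.lower at h
  unfold PySem.Str.strIsdigit pyLstripPlus PySem.Str.stripChars
  simp only [String.toList_ofList, hpunct] at h ⊢
  rw [stripChars_lower_comm] at h
  set m := PySem.Chars.stripChars c.toList [',', '.'] with hm
  have hex : ∃ l : Char, 97 ≤ l.toNat ∧ ∃ xs, PySem.Chars.lower m = l :: xs := by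
    have hinj : ∀ t : String, String.ofList (PySem.Chars.lower m) = t →
        PySem.Chars.lower m = t.toList := by
      intro t ht; rw [← ht, String.toList_ofList]
    simp only [pyAllowedActions, List.contains_cons, List.contains_nil, Bool.or_eq_true,
      beq_iff_eq] at h
    rcases h with h | h | h | (h | hF)
    · exact ⟨'o', by decide, _, hinj "on" h⟩
    · exact ⟨'o', by decide, _, hinj "off" h⟩
    · exact ⟨'t', by decide, _, hinj "toggle" h⟩
    · exact ⟨'s', by decide, _, hinj "status" h⟩
    · exact absurd hF (by decide)
  obtain ⟨l, h97, xs, hlm⟩ := hex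
  unfold PySem.Chars.lower at hlm
  rw [List.map_eq_cons_iff] at hlm
  obtain ⟨x, m', hm', hlow, -⟩ := hlm
  obtain ⟨hplus, hdig⟩ := head_not_plus_digit x l hlow h97
  rw [hm']
  rw [List.dropWhile_cons_of_neg (by simp [hplus])]
  unfold PySem.Chars.strIsdigit
  simp [hdig]

lemma aLoop_spec (toks : List String) (a : Option String) (t : Option Int) :
    aLoop toks a t =
      ((a.orElse fun _ => ((toks.map PySem.Str.strip).filter altValid).findSome? altActionOf),
       (t.orElse fun _ => ((toks.map PySem.Str.strip).filter altValid).findSome?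
          (fun c => altAsInt (PySem.Str.stripChars c ",.")))) := by
  induction toks generalizing a t with
  | nil => cases a <;> cases t <;> simp [aLoop]
  | cons tok rest ih =>
    simp only [aLoop, List.map_cons, List.filter_cons]
    by_cases h1 : (PySem.Str.strip tok == "") = true
    · rw [if_pos h1]
      have e1 : (PySem.Str.strip tok == "") = true := h1
      have hnv : altValid (PySem.Str.strip tok) = false := by
        simp only [altValid, e1, Bool.not_true, Bool.false_and]
      rw [if_neg (by rw [hnv]; exact Bool.false_ne_true)]
      exact ih a t
    · rw [if_neg h1]
      by_cases h2 : (PySem.Str.startswith (PySem.Str.strip tok) "@") = true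
      · rw [if_pos h2]
        have hnv : altValid (PySem.Str.strip tok) = false := by
          simp only [altValid, h2, Bool.not_true, Bool.and_false]
        rw [if_neg (by rw [hnv]; exact Bool.false_ne_true)]
        exact ih a t
      · rw [if_neg h2]
        have e1 : (PySem.Str.strip tok == "") = false := Bool.eq_false_iff.mpr h1
        have e2 : PySem.Str.startswith (PySem.Str.strip tok) "@" = false := Bool.eq_false_iff.mpr h2
        have hv : altValid (PySem.Str.strip tok) = true := by
          simp only [altValid, e1, e2, Bool.not_false, Bool.and_self]
        rw [if_pos hv]
        by_cases h3 : (pyAllowedActions.contains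
            (PySem.Str.stripChars (PySem.Str.lower (PySem.Str.strip tok)) ",.") &&
            a.isNone) = true
        · rw [if_pos h3]
          rw [Bool.and_eq_true, Option.isNone_iff_eq_none] at h3
          obtain ⟨hall, ha⟩ := h3
          subst ha
          have hact : altActionOf (PySem.Str.strip tok) =
              some (PySem.Str.stripChars (PySem.Str.lower (PySem.Str.strip tok)) ",.") := by
            simp only [altActionOf]; rw [if_pos hall]
          have htgt := excl (PySem.Str.strip tok) hall
          cases t with
          | some v =>
            rw [ih]
            simp only [Option.orElse_some, Option.orElse_none, List.findSome?_cons, hact]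
          | none =>
            rw [ih]
            simp only [Option.orElse_some, Option.orElse_none, List.findSome?_cons, hact, htgt]
        · rw [if_neg h3]
          have hactEq : (Option.orElse a fun _ => List.findSome? altActionOf
                (PySem.Str.strip tok :: (rest.map PySem.Str.strip).filter altValid)) =
              (Option.orElse a fun _ => List.findSome? altActionOf
                ((rest.map PySem.Str.strip).filter altValid)) := by
            cases a with
            | some x => simp only [Option.orElse_some]
            | none =>
              have hnc : pyAllowedActions.contains
                  (PySem.Str.stripChars (PySem.Str.lower (PySem.Str.strip tok)) ",.") = false := by
                cases hc : pyAllowedActions.contains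
                    (PySem.Str.stripChars (PySem.Str.lower (PySem.Str.strip tok)) ",.") with
                | false => rfl
                | true => exact absurd (by rw [hc]; rfl) h3
              have hactn : altActionOf (PySem.Str.strip tok) = none := by
                simp only [altActionOf]; rw [if_neg (by rw [hnc]; exact Bool.false_ne_true)]
              simp only [Option.orElse_none, List.findSome?_cons, hactn]
          rw [hactEq]
          by_cases h4 : (PySem.Str.strIsdigit (pyLstripPlus
              (PySem.Str.stripChars (PySem.Str.strip tok) ",.")) && t.isNone) = true
          · rw [if_pos h4]
            rw [Bool.and_eq_true, Option.isNone_iff_eq_none] at h4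
            obtain ⟨hdig, ht⟩ := h4
            subst ht
            have htgtF : altAsInt (PySem.Str.stripChars (PySem.Str.strip tok) ",.") =
                PySem.Int.ofStr? (PySem.Str.stripChars (PySem.Str.strip tok) ",.") := by
              simp only [altAsInt]; rw [if_pos hdig]
            cases hv' : PySem.Int.ofStr? (PySem.Str.stripChars (PySem.Str.strip tok) ",.") with
            | some v =>
              show aLoop rest a (some v) = _
              rw [ih]
              simp only [Option.orElse_some, Option.orElse_none, List.findSome?_cons, htgtF, hv']
            | none =>
              show aLoop rest a none = _
              rw [ih]
              simp only [Option.orElse_none, List.findSome?_cons, htgtF, hv']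
          · rw [if_neg h4]
            rw [ih]
            cases t with
            | some v => simp only [Option.orElse_some]
            | none =>
              have hnd : PySem.Str.strIsdigit (pyLstripPlus
                  (PySem.Str.stripChars (PySem.Str.strip tok) ",.")) = false := by
                cases hc : PySem.Str.strIsdigit (pyLstripPlus
                    (PySem.Str.stripChars (PySem.Str.strip tok) ",.")) with
                | false => rfl
                | true => exact absurd (by rw [hc]; rfl) h4
              have htgtn : altAsInt (PySem.Str.stripChars (PySem.Str.strip tok) ",.") = none := by
                simp only [altAsInt]; rw [if_neg (by rw [hnd]; exact Bool.false_ne_true)]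
              simp only [Option.orElse_none, List.findSome?_cons, htgtn]

-- ===== VERDICT (by name: the statement is the Claim_ definition above) =====
theorem extract_action_and_target_py_spec : Claim_equal_extract_action_and_target_py := by
  intro args default_user_id _
  show extract_action_and_target_py args default_user_id =
    extract_action_and_target_py_alt args default_user_id
  unfold extract_action_and_target_py extract_action_and_target_py_alt
  rw [aLoop_spec]
  simp only [Option.orElse_none]
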